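-- pv_equiv track=rewrite | github.com/little-ripper/python-algorithms | cap4/maximum_permutation_pag.77.py | naive_max_permutation
-- ===== SOURCE A (Python) =====
-- def naive_max_permutation(M, A=None):
--     if A is None:
--         A = set(range(len(M)))
--     if len(A) == 1:
--         return A
--     B = set(M[i] for i in A)
--     C = A - B
--     if C:
--         A.remove(C.pop())
--         return naive_max_permutation(M, A)
--     return A
-- ===== SOURCE B (Python) =====
-- # Reference-count + worklist: removes each unreferenced element once instead of A's
-- # rescan-everything-per-removal recursion.
-- # Note: A mutates its argument set A in place (removes elements); B leaves it unchanged
-- # (the equivalence claimed is about the return value only).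
-- def naive_max_permutation(M, A=None):
--     S = set(range(len(M))) if A is None else A
--     if len(S) <= 1:
--         return set(S)
--     alive = set(S)
--     cnt = {i: 0 for i in S}
--     for i in S:
--         v = M[i]
--         if v in cnt:
--             cnt[v] += 1
--     stack = [i for i in S if cnt[i] == 0]
--     while stack and len(alive) > 1:
--         x = stack.pop()
--         if x not in alive:
--             continue
--         alive.remove(x)
--         v = M[x]
--         if v in cnt:
--             cnt[v] -= 1
--             if cnt[v] == 0 and v in alive:
--                 stack.append(v)
--     return alive
-- ===== Notes on version B (the rewrite author's own statement) =====
-- stated objective: alternative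
-- what changed: Replaces A's recursion that rebuilds the whole referenced-value set and rescans it after every single removal with one reference-count pass plus a worklist of unreferenced elements, each element being removed and its single outgoing reference decremented at most once.
-- outside the precondition, e.g. on naive_max_permutation([5, 5], None): A returns {1}, B returns {0}
import Mathlib
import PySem

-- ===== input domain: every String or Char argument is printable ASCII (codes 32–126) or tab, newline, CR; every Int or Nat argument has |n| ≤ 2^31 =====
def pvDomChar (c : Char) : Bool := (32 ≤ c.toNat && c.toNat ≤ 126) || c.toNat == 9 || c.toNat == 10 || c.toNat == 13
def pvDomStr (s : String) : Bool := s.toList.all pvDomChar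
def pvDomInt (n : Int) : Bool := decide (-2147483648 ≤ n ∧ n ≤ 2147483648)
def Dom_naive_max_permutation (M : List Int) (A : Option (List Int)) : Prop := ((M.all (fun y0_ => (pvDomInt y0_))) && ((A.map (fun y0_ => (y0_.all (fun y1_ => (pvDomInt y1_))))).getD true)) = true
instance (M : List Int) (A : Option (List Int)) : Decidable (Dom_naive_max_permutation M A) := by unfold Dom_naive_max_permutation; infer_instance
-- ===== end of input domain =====

-- B replaces A's rescan-and-remove-one recursion by a single reference-count pass plus a
-- worklist of unreferenced elements (objective: alternative). A mutates its argument set in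
-- place; B does not — the equivalence claimed is about the return value only.

-- ===== PORT A =====
-- set.pop() order is not modelled by PySem; under Pre_ the result does not depend on which
-- element of C is removed, so the port removes the first element of C (in A's insertion order).
def pa_loop (M : List Int) (A : List Int) : List Int :=
  if A.length = 1 then A
  else
    let B := PySem.Set.ofList (A.filterMap (fun i => PySem.List.pyGet? M i))
    match _hC : PySem.Set.diff A B with
    | [] => A
    | c :: _ => pa_loop M (A.erase c)
termination_by A.length
decreasing_by
  have hc : c ∈ PySem.Set.diff A B := by rw [_hC]; exact List.mem_cons_self
  have hcA : c ∈ A := ((PySem.Set.mem_diff A B c).1 hc).1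
  have := List.length_erase_of_mem hcA
  have := List.length_pos_of_mem hcA
  omega

def naive_max_permutation (M : List Int) (A : Option (List Int)) : List Int :=
  match A with
  | none => pa_loop M (PySem.Set.ofList (PySem.List.pyRange 0 (M.length : Int) 1))
  | some a => pa_loop M a

-- ===== PORT B =====
-- stack is kept top-first (Python's list.pop()/append work at the end).
-- M[i] is ported as pyGetD M i 0: under Pre_ every consulted index is in range.
def pb_loop (M : List Int) (cnt : PySem.Dict Int Int) (alive : List Int) (stack : List Int) : List Int :=
  match stack with
  | [] => alive
  | x :: rest =>
    if alive.length ≤ 1 then alive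
    else if _hx : x ∈ alive then
      let alive' := alive.erase x
      let v := PySem.List.pyGetD M x 0
      match cnt.get? v with
      | none => pb_loop M cnt alive' rest
      | some c =>
        let cnt' := cnt.insert v (c - 1)
        if c - 1 = 0 ∧ v ∈ alive' then pb_loop M cnt' alive' (v :: rest)
        else pb_loop M cnt' alive' rest
    else pb_loop M cnt alive rest
termination_by alive.length + stack.length
decreasing_by
  all_goals simp only [List.length_cons]
  all_goals try (have h1 := List.length_erase_of_mem _hx; have h2 := List.length_pos_of_mem _hx; clear h2)
  all_goals omega

def pb_main (M S : List Int) : List Int :=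
  if S.length ≤ 1 then PySem.Set.ofList S
  else
    let cnt0 := S.foldl (fun d i => d.insert i 0) PySem.Dict.empty
    let cnt := S.foldl (fun d i =>
        match d.get? (PySem.List.pyGetD M i 0) with
        | none => d
        | some c => d.insert (PySem.List.pyGetD M i 0) (c + 1)) cnt0
    let stack := S.filter (fun i => cnt.getD i 0 = 0)
    pb_loop M cnt S stack.reverse

def naive_max_permutation_alt (M : List Int) (A : Option (List Int)) : List Int :=
  pb_main M (match A with
    | none => PySem.Set.ofList (PySem.List.pyRange 0 (M.length : Int) 1)
    | some a => a)

-- ===== PRECONDITION & SPEC =====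
-- refOk M T: every element of T is referenced from inside T (T is a self-sustaining set of indices).
def refOk (M : List Int) (T : List Int) : Prop :=
  ∀ t ∈ T, ∃ j ∈ T, PySem.List.pyGet? M j = some t

-- Pre_ excludes (a) inputs where A raises IndexError (an explicit set A holding an index outside
-- [-len(M), len(M)) with |A| ≥ 2), and (b) inputs whose reference graph sustains no element at all
-- (no nonempty self-referenced subset) while |A| ≥ 2: there the process shrinks to a single
-- survivor chosen by CPython's unspecified set.pop() order, an artefact of A's implementation.
-- The Nodup conjunct only restates that the list stands for a Python set (distinct elements).
def Pre_naive_max_permutation (M : List Int) (A : Option (List Int)) : Prop :=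
  let S := match A with
    | none => PySem.List.pyRange 0 (M.length : Int) 1
    | some a => a
  S.Nodup ∧ (S.length ≤ 1 ∨
    ((∀ i ∈ S, PySem.Raise.InRange M.length i) ∧
     ∃ T ∈ S.sublists, T ≠ [] ∧ refOk M T))
instance (M : List Int) (A : Option (List Int)) : Decidable (Pre_naive_max_permutation M A) := by
  unfold Pre_naive_max_permutation refOk; infer_instance

def pvWitness_naive_max_permutation : List Int × Option (List Int) := ([1, 0, 0], none)

def Spec_naive_max_permutation (M : List Int) (A : Option (List Int)) (out : List Int) : Prop := out = naive_max_permutation_alt M A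
instance (M : List Int) (A : Option (List Int)) (out : List Int) : Decidable (Spec_naive_max_permutation M A out) := by unfold Spec_naive_max_permutation; infer_instance

-- ===== CLAIM (what is proved, stated in full; the proofs are below) =====
def Claim_equal_naive_max_permutation : Prop := ∀ (M : List Int) (A : Option (List Int)), Dom_naive_max_permutation M A → Pre_naive_max_permutation M A → Spec_naive_max_permutation M A (naive_max_permutation M A)

-- ===== LEMMAS AND PROOFS =====

-- x survives iff some self-sustaining subset of S contains it (the greatest fixed point).
def inGFP (M S : List Int) (x : Int) : Prop :=
  ∃ T : List Int, (∀ a ∈ T, a ∈ S) ∧ refOk M T ∧ x ∈ T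

theorem pyGet?_eq_some_pyGetD (xs : List Int) (i d : Int) (h : PySem.Raise.InRange xs.length i) :
    PySem.List.pyGet? xs i = some (PySem.List.pyGetD xs i d) := by
  rcases heq : PySem.List.pyGet? xs i with _ | y
  · exact absurd ((PySem.List.pyGet?_eq_none_iff xs i).1 heq) (by simpa using h)
  · simp [PySem.List.pyGetD, PySem.List.pyGet?] at *; simp [heq]

theorem pyGetD_of_pyGet? (xs : List Int) (i d y : Int) (h : PySem.List.pyGet? xs i = some y) :
    PySem.List.pyGetD xs i d = y := by
  simp [PySem.List.pyGetD, PySem.List.pyGet?] at *; simp [h]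

theorem countP_erase_split (l : List Int) (p : Int → Bool) (x : Int) (hx : x ∈ l) :
    l.countP p = (l.erase x).countP p + (if p x then 1 else 0) := by
  rw [(List.perm_cons_erase hx).countP_eq, List.countP_cons]

theorem sublist_eq_of_mem_iff {l1 l2 S : List Int} (h1 : l1.Sublist S) (h2 : l2.Sublist S)
    (hS : S.Nodup) (hm : ∀ x, x ∈ l1 ↔ x ∈ l2) : l1 = l2 := by
  induction S generalizing l1 l2 with
  | nil => simp_all [List.sublist_nil]
  | cons s S' ih =>
    obtain ⟨hs', hS'⟩ := List.nodup_cons.1 hS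
    rcases List.sublist_cons_iff.1 h1 with h1' | ⟨r1, rfl, h1'⟩ <;>
      rcases List.sublist_cons_iff.1 h2 with h2' | ⟨r2, rfl, h2'⟩
    · exact ih h1' h2' hS' hm
    · exact absurd (h1'.subset ((hm s).2 List.mem_cons_self)) hs'
    · exact absurd (h2'.subset ((hm s).1 List.mem_cons_self)) hs'
    · have : r1 = r2 := by
        refine ih h1' h2' hS' (fun x => ⟨fun hx => ?_, fun hx => ?_⟩)
        · rcases List.mem_cons.1 ((hm x).1 (List.mem_cons_of_mem _ hx)) with rfl | h
          · exact absurd (h1'.subset hx) hs'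
          · exact h
        · rcases List.mem_cons.1 ((hm x).2 (List.mem_cons_of_mem _ hx)) with rfl | h
          · exact absurd (h2'.subset hx) hs'
          · exact h
      rw [this]

theorem pa_loop_char (M S : List Int) (_hS : S.Nodup) (hne : ∃ g, inGFP M S g) :
    ∀ (A : List Int), A.Sublist S → (∀ x, inGFP M S x → x ∈ A) →
      (pa_loop M A).Sublist A ∧ (∀ x, x ∈ pa_loop M A ↔ inGFP M S x) := by
  have main : ∀ (n : Nat) (A : List Int), A.length = n → A.Sublist S →
      (∀ x, inGFP M S x → x ∈ A) →
      (pa_loop M A).Sublist A ∧ (∀ x, x ∈ pa_loop M A ↔ inGFP M S x) := by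
    intro n
    induction n using Nat.strong_induction_on with
    | _ n ih =>
      intro A hn hsub hgfp
      rw [pa_loop]
      by_cases h1 : A.length = 1
      · simp only [if_pos h1]
        obtain ⟨a, rfl⟩ := List.length_eq_one_iff.1 h1
        obtain ⟨g, hg⟩ := hne
        have hga : g = a := by simpa using hgfp g hg
        refine ⟨List.Sublist.refl _, fun x => ⟨fun hx => ?_, fun hx => hgfp x hx⟩⟩
        have hxa : x = a := by simpa using hx
        subst hxa; exact hga ▸ hg
      · simp only [if_neg h1]
        split
        · -- C = []
          rename_i heq
          have hself : refOk M A := by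
            intro a ha
            by_cases hB : a ∈ PySem.Set.ofList (List.filterMap
                (fun x => match x with | ⟨i, _⟩ => PySem.List.pyGet? M i) A.attach)
            · simpa [PySem.Set.mem_ofList, List.mem_filterMap] using hB
            · exact absurd ((PySem.Set.mem_diff _ _ a).2 ⟨ha, hB⟩) (by simp [heq])
          refine ⟨List.Sublist.refl _, fun x => ⟨fun hx => ⟨A, fun t ht => hsub.subset ht, hself, hx⟩,
            fun hx => hgfp x hx⟩⟩
        · -- C = c :: rest
          rename_i c rest heq
          have hc : c ∈ PySem.Set.diff A _ := heq ▸ List.mem_cons_self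
          obtain ⟨hcA, hcB⟩ := (PySem.Set.mem_diff _ _ c).1 hc
          have hcB' : ∀ j ∈ A, ¬ PySem.List.pyGet? M j = some c := by
            simpa [PySem.Set.mem_ofList, List.mem_filterMap] using hcB
          have hgfp' : ∀ x, inGFP M S x → x ∈ A.erase c := by
            intro x hx
            have hxA := hgfp x hx
            have hxc : x ≠ c := by
              rintro rfl
              obtain ⟨T, hTS, hTref, hxT⟩ := hx
              obtain ⟨j, hjT, hj⟩ := hTref x hxT
              exact hcB' j (hgfp j ⟨T, hTS, hTref, hjT⟩) hj
            exact (List.mem_erase_of_ne hxc).2 hxA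
          have hlt : (A.erase c).length < n := by
            have := List.length_erase_of_mem hcA
            have := List.length_pos_of_mem hcA
            omega
          obtain ⟨hsl, hiff⟩ := ih _ hlt (A.erase c) rfl
            ((List.erase_sublist).trans hsub) hgfp'
          exact ⟨hsl.trans List.erase_sublist, hiff⟩
  exact fun A => main A.length A rfl

-- singleton-alive ending, shared by both stop conditions of pb_loop
theorem small_alive_char (M S : List Int) (alive : List Int)
    (hgfpal : ∀ x, inGFP M S x → x ∈ alive) (hne : ∃ g, inGFP M S g)
    (hlen : alive.length ≤ 1) : ∀ x, x ∈ alive ↔ inGFP M S x := by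
  obtain ⟨g, hg⟩ := hne
  have hga := hgfpal g hg
  have : alive = [g] := by
    rcases alive with _ | ⟨a, _ | _⟩ <;> simp_all
  subst this
  intro x
  constructor
  · intro hx
    have hxg : x = g := by simpa using hx
    exact hxg ▸ hg
  · exact fun hx => hgfpal x hx


theorem pb_loop_char (M S : List Int) (hS : S.Nodup)
    (hval : ∀ i ∈ S, PySem.Raise.InRange M.length i)
    (hne : ∃ g, inGFP M S g) :
    ∀ (alive stack : List Int) (cnt : PySem.Dict Int Int),
      alive.Sublist S →
      (∀ v, cnt.get? v = if v ∈ S then some ((alive.countP (fun j => PySem.List.pyGetD M j 0 == v) : Int)) else none) →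
      (∀ x ∈ stack, x ∈ alive) → stack.Nodup →
      (∀ x ∈ stack, alive.countP (fun j => PySem.List.pyGetD M j 0 == x) = 0) →
      (∀ a ∈ alive, alive.countP (fun j => PySem.List.pyGetD M j 0 == a) = 0 → a ∈ stack) →
      (∀ x, inGFP M S x → x ∈ alive) →
      (pb_loop M cnt alive stack).Sublist alive ∧
        (∀ x, x ∈ pb_loop M cnt alive stack ↔ inGFP M S x) := by
  have keyuniq : ∀ (alive : List Int), alive.Sublist S → (∀ y, inGFP M S y → y ∈ alive) →
      ∀ x, inGFP M S x → alive.countP (fun j => PySem.List.pyGetD M j 0 == x) = 0 → False := by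
    intro alive hsub hgal x hx hcount
    obtain ⟨T, hTS, hTref, hxT⟩ := hx
    obtain ⟨j, hjT, hj⟩ := hTref x hxT
    have hjal : j ∈ alive := hgal j ⟨T, hTS, hTref, hjT⟩
    have hjget : PySem.List.pyGetD M j 0 = x := pyGetD_of_pyGet? M j 0 x hj
    have hpos : 0 < alive.countP (fun j => PySem.List.pyGetD M j 0 == x) :=
      List.countP_pos_iff.2 ⟨j, hjal, by simp [hjget]⟩
    omega
  have main : ∀ (n : Nat) (alive stack : List Int) (cnt : PySem.Dict Int Int),
      alive.length + stack.length = n →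
      alive.Sublist S →
      (∀ v, cnt.get? v = if v ∈ S then some ((alive.countP (fun j => PySem.List.pyGetD M j 0 == v) : Int)) else none) →
      (∀ x ∈ stack, x ∈ alive) → stack.Nodup →
      (∀ x ∈ stack, alive.countP (fun j => PySem.List.pyGetD M j 0 == x) = 0) →
      (∀ a ∈ alive, alive.countP (fun j => PySem.List.pyGetD M j 0 == a) = 0 → a ∈ stack) →
      (∀ x, inGFP M S x → x ∈ alive) →
      (pb_loop M cnt alive stack).Sublist alive ∧
        (∀ x, x ∈ pb_loop M cnt alive stack ↔ inGFP M S x) := by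
    intro n
    induction n using Nat.strong_induction_on with
    | _ n ih =>
      intro alive stack cnt hn hsub hcnt hsal hsnd hscnt hinstack hgal
      cases stack with
      | nil =>
        rw [pb_loop]
        refine ⟨List.Sublist.refl _, fun x => ⟨fun hx => ?_, fun hx => hgal x hx⟩⟩
        have hself : refOk M alive := by
          intro a ha
          have hc0 : alive.countP (fun j => PySem.List.pyGetD M j 0 == a) ≠ 0 := by
            intro h0; exact absurd (hinstack a ha h0) (by simp)
          obtain ⟨j, hj, hpj⟩ := List.countP_pos_iff.1 (Nat.pos_of_ne_zero hc0)
          refine ⟨j, hj, ?_⟩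
          rw [pyGet?_eq_some_pyGetD M j 0 (hval j (hsub.subset hj))]
          simpa using hpj
        exact ⟨alive, fun t ht => hsub.subset ht, hself, hx⟩
      | cons x rest =>
        rw [pb_loop]
        by_cases hlen : alive.length ≤ 1
        · simp only [if_pos hlen]
          exact ⟨List.Sublist.refl _, small_alive_char M S alive hgal hne hlen⟩
        · simp only [if_neg hlen]
          have hxal : x ∈ alive := hsal x List.mem_cons_self
          rw [dif_pos hxal]
          have hand : alive.Nodup := hsub.nodup hS
          have herase_sub : (alive.erase x).Sublist S := (List.erase_sublist).trans hsub
          have hxnotin : x ∉ alive.erase x := hand.not_mem_erase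
          have hxrest : x ∉ rest := (List.nodup_cons.1 hsnd).1
          have hrestnd : rest.Nodup := (List.nodup_cons.1 hsnd).2
          have hsplit : ∀ w, alive.countP (fun j => PySem.List.pyGetD M j 0 == w) =
              (alive.erase x).countP (fun j => PySem.List.pyGetD M j 0 == w) +
                (if PySem.List.pyGetD M x 0 == w then 1 else 0) :=
            fun w => countP_erase_split alive _ x hxal
          have hxcnt0 : alive.countP (fun j => PySem.List.pyGetD M j 0 == x) = 0 :=
            hscnt x List.mem_cons_self
          have hgal' : ∀ g, inGFP M S g → g ∈ alive.erase x := by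
            intro g hg
            have hgx : g ≠ x := by rintro rfl; exact keyuniq alive hsub hgal g hg hxcnt0
            exact (List.mem_erase_of_ne hgx).2 (hgal g hg)
          have hrest_al' : ∀ z ∈ rest, z ∈ alive.erase x := by
            intro z hz
            have hzx : z ≠ x := by rintro rfl; exact hxrest hz
            exact (List.mem_erase_of_ne hzx).2 (hsal z (List.mem_cons_of_mem _ hz))
          have hrest_cnt' : ∀ z ∈ rest,
              (alive.erase x).countP (fun j => PySem.List.pyGetD M j 0 == z) = 0 := by
            intro z hz
            have h1 := (List.erase_sublist (a := x) (l := alive)).countP_le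
              (p := fun j => PySem.List.pyGetD M j 0 == z)
            have h2 := hscnt z (List.mem_cons_of_mem _ hz)
            omega
          have hmes : ∀ (k : Nat), k ≤ 1 → (alive.erase x).length + (rest.length + k) < n := by
            intro k hk
            have := List.length_erase_of_mem hxal
            have := List.length_pos_of_mem hxal
            simp only [List.length_cons] at hn
            omega
          by_cases hvS : PySem.List.pyGetD M x 0 ∈ S
          · rw [hcnt (PySem.List.pyGetD M x 0), if_pos hvS]
            dsimp only
            have hvx : (PySem.List.pyGetD M x 0 == PySem.List.pyGetD M x 0) = true := by simp
            have hC : alive.countP (fun j => PySem.List.pyGetD M j 0 == PySem.List.pyGetD M x 0) =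
                (alive.erase x).countP (fun j => PySem.List.pyGetD M j 0 == PySem.List.pyGetD M x 0) + 1 := by
              rw [hsplit (PySem.List.pyGetD M x 0)]; simp
            have hcnt' : ∀ w, ((cnt.insert (PySem.List.pyGetD M x 0)
                ((alive.countP (fun j => PySem.List.pyGetD M j 0 == PySem.List.pyGetD M x 0) : Int) - 1)).get? w) =
                if w ∈ S then some (((alive.erase x).countP (fun j => PySem.List.pyGetD M j 0 == w) : Int)) else none := by
              intro w
              rw [PySem.Dict.get?_insert]
              by_cases hwv : w = PySem.List.pyGetD M x 0
              · subst hwv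
                rw [if_pos rfl, if_pos hvS, Option.some.injEq]
                omega
              · rw [if_neg hwv, hcnt w]
                by_cases hwS : w ∈ S
                · rw [if_pos hwS, if_pos hwS, Option.some.injEq]
                  have hwx : (PySem.List.pyGetD M x 0 == w) = false := by
                    simp [Ne.symm hwv]
                  have := hsplit w
                  rw [hwx] at this
                  simp at this
                  omega
                · rw [if_neg hwS, if_neg hwS]
            split_ifs with hcond
            · -- push v
              obtain ⟨hc0, hvin⟩ := hcond
              have hvrest : PySem.List.pyGetD M x 0 ∉ rest := by
                intro hvr
                have := hscnt _ (List.mem_cons_of_mem _ hvr)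
                omega
              have hcnt_er0 : (alive.erase x).countP
                  (fun j => PySem.List.pyGetD M j 0 == PySem.List.pyGetD M x 0) = 0 := by omega
              refine (ih _ (hmes 1 le_rfl) (alive.erase x) (PySem.List.pyGetD M x 0 :: rest) _
                (by simp) herase_sub hcnt' ?_ ?_ ?_ ?_ hgal').imp
                (fun hsl => hsl.trans List.erase_sublist) id
              · intro z hz
                rcases List.mem_cons.1 hz with rfl | hz'
                · exact hvin
                · exact hrest_al' z hz'
              · exact List.nodup_cons.2 ⟨hvrest, hrestnd⟩
              · intro z hz
                rcases List.mem_cons.1 hz with rfl | hz'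
                · exact hcnt_er0
                · exact hrest_cnt' z hz'
              · intro a ha hcnta
                by_cases hav : a = PySem.List.pyGetD M x 0
                · exact hav ▸ List.mem_cons_self
                · refine List.mem_cons_of_mem _ ?_
                  have hax : (PySem.List.pyGetD M x 0 == a) = false := by simp [Ne.symm hav]
                  have := hsplit a
                  rw [hax] at this
                  simp at this
                  have ha0 : alive.countP (fun j => PySem.List.pyGetD M j 0 == a) = 0 := by omega
                  have haal : a ∈ alive := List.mem_of_mem_erase ha
                  rcases List.mem_cons.1 (hinstack a haal ha0) with rfl | h
                  · exact absurd ha hxnotin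
                  · exact h
            · -- no push
              refine (ih _ (hmes 0 (by omega)) (alive.erase x) rest _
                (by omega) herase_sub hcnt' hrest_al' hrestnd hrest_cnt' ?_ hgal').imp
                (fun hsl => hsl.trans List.erase_sublist) id
              intro a ha hcnta
              by_cases hav : a = PySem.List.pyGetD M x 0
              · exfalso
                apply hcond
                subst hav
                constructor
                · omega
                · exact ha
              · have hax : (PySem.List.pyGetD M x 0 == a) = false := by simp [Ne.symm hav]
                have := hsplit a
                rw [hax] at this
                simp at this
                have ha0 : alive.countP (fun j => PySem.List.pyGetD M j 0 == a) = 0 := by omega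
                have haal : a ∈ alive := List.mem_of_mem_erase ha
                rcases List.mem_cons.1 (hinstack a haal ha0) with rfl | h
                · exact absurd ha hxnotin
                · exact h
          · -- v ∉ S : counter untouched
            rw [hcnt (PySem.List.pyGetD M x 0), if_neg hvS]
            dsimp only
            have hcnt' : ∀ w, cnt.get? w =
                if w ∈ S then some (((alive.erase x).countP (fun j => PySem.List.pyGetD M j 0 == w) : Int)) else none := by
              intro w
              rw [hcnt w]
              by_cases hwS : w ∈ S
              · rw [if_pos hwS, if_pos hwS, Option.some.injEq]
                have hwx : (PySem.List.pyGetD M x 0 == w) = false := by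
                  simp; rintro rfl; exact hvS hwS
                have := hsplit w
                rw [hwx] at this
                simp at this
                omega
              · rw [if_neg hwS, if_neg hwS]
            refine (ih _ (hmes 0 (by omega)) (alive.erase x) rest _
              (by omega) herase_sub hcnt' hrest_al' hrestnd hrest_cnt' ?_ hgal').imp
              (fun hsl => hsl.trans List.erase_sublist) id
            intro a ha hcnta
            have haS : a ∈ S := herase_sub.subset ha
            have hax : (PySem.List.pyGetD M x 0 == a) = false := by
              simp; rintro rfl; exact hvS haS
            have := hsplit a
            rw [hax] at this
            simp at this
            have ha0 : alive.countP (fun j => PySem.List.pyGetD M j 0 == a) = 0 := by omega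
            have haal : a ∈ alive := List.mem_of_mem_erase ha
            rcases List.mem_cons.1 (hinstack a haal ha0) with rfl | h
            · exact absurd ha hxnotin
            · exact h
  exact fun alive stack cnt hsub hcnt hsal hsnd hscnt hinstack hgal =>
    main (alive.length + stack.length) alive stack cnt rfl hsub hcnt hsal hsnd hscnt hinstack hgal

theorem cnt0_get? : ∀ (L : List Int) (d : PySem.Dict Int Int) (v : Int),
    (L.foldl (fun d i => d.insert i 0) d).get? v = if v ∈ L then some 0 else d.get? v := by
  intro L
  induction L with
  | nil => intro d v; simp
  | cons i L ih =>
    intro d v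
    rw [List.foldl_cons, ih]
    by_cases hvL : v ∈ L
    · simp [hvL]
    · rw [if_neg hvL, PySem.Dict.get?_insert]
      by_cases hvi : v = i <;> simp [hvi, hvL]

theorem cnt1_get? (M S : List Int) : ∀ (L : List Int) (d : PySem.Dict Int Int) (g : Int → Int),
    (∀ v, d.get? v = if v ∈ S then some (g v) else none) →
    ∀ v, (L.foldl (fun d i =>
        match d.get? (PySem.List.pyGetD M i 0) with
        | none => d
        | some c => d.insert (PySem.List.pyGetD M i 0) (c + 1)) d).get? v =
      if v ∈ S then some (g v + (L.countP (fun j => PySem.List.pyGetD M j 0 == v) : Int)) else none := by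
  intro L
  induction L with
  | nil => intro d g hd v; simp [hd v]
  | cons i L ih =>
    intro d g hd v
    rw [List.foldl_cons]
    by_cases hw : PySem.List.pyGetD M i 0 ∈ S
    · have hstep : (match d.get? (PySem.List.pyGetD M i 0) with
          | none => d
          | some c => d.insert (PySem.List.pyGetD M i 0) (c + 1)) =
          d.insert (PySem.List.pyGetD M i 0) (g (PySem.List.pyGetD M i 0) + 1) := by
        rw [hd]; simp [hw]
      rw [hstep, ih _ (fun u => if u = PySem.List.pyGetD M i 0 then g u + 1 else g u) ?_ v]
      · by_cases hvS : v ∈ S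
        · by_cases hvw : v = PySem.List.pyGetD M i 0
          · subst hvw
            simp [hvS]
            ring
          · simp only [if_pos hvS, if_neg hvw, Option.some.injEq, List.countP_cons]
            have hxv : (PySem.List.pyGetD M i 0 == v) = false := by simp [Ne.symm hvw]
            rw [hxv]
            push_cast
            ring
        · simp [hvS]
      · intro u
        rw [PySem.Dict.get?_insert]
        by_cases hu : u = PySem.List.pyGetD M i 0 <;> simp [hu, hw, hd u]
    · have hstep : (match d.get? (PySem.List.pyGetD M i 0) with
          | none => d
          | some c => d.insert (PySem.List.pyGetD M i 0) (c + 1)) = d := by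
        rw [hd]; simp [hw]
      rw [hstep, ih _ g hd v]
      by_cases hvS : v ∈ S
      · simp only [if_pos hvS, Option.some.injEq, List.countP_cons]
        have hxv : (PySem.List.pyGetD M i 0 == v) = false := by
          simp; rintro rfl; exact hw hvS
        rw [hxv]
        push_cast
        ring
      · simp [hvS]

theorem pa_loop_nil (M : List Int) : pa_loop M [] = [] := by
  rw [pa_loop]; rfl

theorem pa_loop_single (M : List Int) (a : Int) : pa_loop M [a] = [a] := by
  rw [pa_loop]; rfl

-- the two ports agree on any survivor-set problem stated directly over the element list S
theorem ports_core (M S : List Int) (hnd : S.Nodup)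
    (h : S.length ≤ 1 ∨ ((∀ i ∈ S, PySem.Raise.InRange M.length i) ∧
      ∃ T ∈ S.sublists, T ≠ [] ∧ refOk M T)) :
    pa_loop M S = pb_main M S := by
  by_cases hlen : S.length ≤ 1
  · rw [pb_main, if_pos hlen, PySem.Set.ofList_eq_self_of_nodup S hnd]
    rcases S with _ | ⟨a, _ | ⟨b, t⟩⟩
    · exact pa_loop_nil M
    · exact pa_loop_single M a
    · simp at hlen
  · rcases h with h | ⟨hval, T, hTmem, hTne, hTref⟩
    · exact absurd h hlen
    · have hTsub : T.Sublist S := List.mem_sublists.1 hTmem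
      obtain ⟨t, ht⟩ := List.exists_mem_of_ne_nil T hTne
      have hne : ∃ g, inGFP M S g := ⟨t, T, fun a ha => hTsub.subset ha, hTref, ht⟩
      have hgfpS : ∀ x, inGFP M S x → x ∈ S := fun x ⟨T', hT'S, _, hxT'⟩ => hT'S x hxT'
      obtain ⟨hslA, hiffA⟩ := pa_loop_char M S hnd hne S (List.Sublist.refl S) hgfpS
      rw [pb_main, if_neg hlen]
      have hcnt : ∀ v, ((S.foldl (fun d i =>
          match d.get? (PySem.List.pyGetD M i 0) with
          | none => d
          | some c => d.insert (PySem.List.pyGetD M i 0) (c + 1))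
            (S.foldl (fun d i => d.insert i 0) (PySem.Dict.empty : PySem.Dict Int Int))).get? v) =
          if v ∈ S then some ((S.countP (fun j => PySem.List.pyGetD M j 0 == v) : Int)) else none := by
        intro v
        rw [cnt1_get? M S S _ (fun u : Int => (0 : Int)) (fun u => by
          rw [cnt0_get?]; simp) v]
        by_cases hvS : v ∈ S
        · rw [if_pos hvS, if_pos hvS, Option.some.injEq]; ring
        · rw [if_neg hvS, if_neg hvS]
      have hgetD : ∀ i ∈ S, ((S.foldl (fun d i =>
          match d.get? (PySem.List.pyGetD M i 0) with
          | none => d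
          | some c => d.insert (PySem.List.pyGetD M i 0) (c + 1))
            (S.foldl (fun d i => d.insert i 0) (PySem.Dict.empty : PySem.Dict Int Int))).getD i 0) =
          (S.countP (fun j => PySem.List.pyGetD M j 0 == i) : Int) := by
        intro i hi
        rw [PySem.Dict.getD_eq_get?_getD, hcnt i, if_pos hi]
        rfl
      have hmemstack : ∀ x, x ∈ (S.filter (fun i => decide (((S.foldl (fun d i =>
          match d.get? (PySem.List.pyGetD M i 0) with
          | none => d
          | some c => d.insert (PySem.List.pyGetD M i 0) (c + 1))
            (S.foldl (fun d i => d.insert i 0) (PySem.Dict.empty : PySem.Dict Int Int))).getD i 0) = 0))).reverse ↔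
          x ∈ S ∧ S.countP (fun j => PySem.List.pyGetD M j 0 == x) = 0 := by
        intro x
        rw [List.mem_reverse, List.mem_filter]
        constructor
        · rintro ⟨hxS, hc⟩
          refine ⟨hxS, ?_⟩
          have := of_decide_eq_true hc
          rw [hgetD x hxS] at this
          omega
        · rintro ⟨hxS, hc⟩
          refine ⟨hxS, decide_eq_true ?_⟩
          rw [hgetD x hxS, hc]
          rfl
      obtain ⟨hslB, hiffB⟩ := pb_loop_char M S hnd hval hne S _ _ (List.Sublist.refl S) hcnt
        (fun x hx => ((hmemstack x).1 hx).1)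
        (List.nodup_reverse.2 (hnd.filter _))
        (fun x hx => ((hmemstack x).1 hx).2)
        (fun a ha hc => (hmemstack a).2 ⟨ha, hc⟩)
        hgfpS
      exact sublist_eq_of_mem_iff hslA hslB hnd (fun x => (hiffA x).trans (hiffB x).symm)

-- ===== VERDICT (by name: the statement is the Claim_ definition above) =====
theorem naive_max_permutation_spec : Claim_equal_naive_max_permutation := by
  unfold Claim_equal_naive_max_permutation
  intro M A _hdom hpre
  unfold Spec_naive_max_permutation
  simp only [Pre_naive_max_permutation] at hpre
  cases A with
  | none =>
    have hr : PySem.Set.ofList (PySem.List.pyRange 0 (M.length : Int) 1) =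
        PySem.List.pyRange 0 (M.length : Int) 1 :=
      PySem.Set.ofList_eq_self_of_nodup _ (PySem.List.nodup_pyRange_one 0 _)
    show pa_loop M (PySem.Set.ofList (PySem.List.pyRange 0 (M.length : Int) 1)) =
      pb_main M (PySem.Set.ofList (PySem.List.pyRange 0 (M.length : Int) 1))
    rw [hr]
    exact ports_core M _ hpre.1 hpre.2
  | some a =>
    show pa_loop M a = pb_main M a
    exact ports_core M a hpre.1 hpre.2
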